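-- pv_equiv track=rewrite | github.com/sueszli/xdsl-exo | leaderboard/bench_exojit.py | iter_indices
-- ===== SOURCE A (Python) =====
-- def iter_indices(shape: tuple[int, ...]):
--     if len(shape) == 1:
--         for i in range(shape[0]):
--             yield (i,)
--     elif len(shape) == 2:
--         for i in range(shape[0]):
--             for j in range(shape[1]):
--                 yield (i, j)
--     elif len(shape) == 3:
--         for i in range(shape[0]):
--             for j in range(shape[1]):
--                 for k in range(shape[2]):
--                     yield (i, j, k)
--     else:
--         raise ValueError(f"unsupported shape rank: {len(shape)}")
-- ===== SOURCE B (Python) =====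
-- def iter_indices(shape: tuple[int, ...]):
--     if len(shape) not in (1, 2, 3):
--         raise ValueError(f"unsupported shape rank: {len(shape)}")
--
--     def rec(prefix, dims):
--         if not dims:
--             yield prefix
--             return
--         for i in range(dims[0]):
--             yield from rec(prefix + (i,), dims[1:])
--
--     yield from rec((), tuple(shape))
-- ===== Notes on version B (the rewrite author's own statement) =====
-- stated objective: alternative
-- what changed: Replaces the three hard-coded nested-loop branches by a single recursive generator that extends a prefix tuple over the remaining dimensions, after one rank guard.
import Mathlib
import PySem

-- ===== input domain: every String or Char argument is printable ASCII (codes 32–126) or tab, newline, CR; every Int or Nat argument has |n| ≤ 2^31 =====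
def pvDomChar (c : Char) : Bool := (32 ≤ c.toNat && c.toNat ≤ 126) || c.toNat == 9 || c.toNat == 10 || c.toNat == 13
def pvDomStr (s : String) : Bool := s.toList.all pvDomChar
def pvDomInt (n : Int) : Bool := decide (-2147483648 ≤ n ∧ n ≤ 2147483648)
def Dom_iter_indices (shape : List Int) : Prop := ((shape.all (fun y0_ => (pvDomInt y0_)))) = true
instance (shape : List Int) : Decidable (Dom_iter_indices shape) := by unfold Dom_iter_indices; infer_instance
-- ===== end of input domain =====

-- B replaces A's three hard-coded nested-loop branches by one prefix-extending recursion over the dimensions (objective: alternative decomposition).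


-- ===== PORT A =====
-- A: three branches on the rank, each a nest of for-loops yielding tuples (yield ↦ flatMap).
def iter_indices (shape : List Int) : List (List Int) :=
  match shape with
  | [a] => (PySem.List.pyRange 0 a 1).flatMap (fun i => [[i]])
  | [a, b] => (PySem.List.pyRange 0 a 1).flatMap (fun i =>
      (PySem.List.pyRange 0 b 1).flatMap (fun j => [[i, j]]))
  | [a, b, c] => (PySem.List.pyRange 0 a 1).flatMap (fun i =>
      (PySem.List.pyRange 0 b 1).flatMap (fun j =>
        (PySem.List.pyRange 0 c 1).flatMap (fun k => [[i, j, k]])))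
  | _ => []  -- A raises ValueError here; excluded by Pre_

-- ===== PORT B =====
-- B's inner recursion: extend the prefix over the remaining dimensions.
def iterIndicesRec (pre : List Int) (dims : List Int) : List (List Int) :=
  match dims with
  | [] => [pre]
  | d :: ds => (PySem.List.pyRange 0 d 1).flatMap (fun i => iterIndicesRec (pre ++ [i]) ds)

def iter_indices_alt (shape : List Int) : List (List Int) :=
  if shape.length = 1 ∨ shape.length = 2 ∨ shape.length = 3 then
    iterIndicesRec [] shape
  else []  -- B raises ValueError here; excluded by Pre_

-- ===== PRECONDITION & SPEC =====
-- Pre_ excludes ranks outside 1..3, on which both A and B raise ValueError.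
def Pre_iter_indices (shape : List Int) : Prop :=
  shape.length = 1 ∨ shape.length = 2 ∨ shape.length = 3
instance (shape : List Int) : Decidable (Pre_iter_indices shape) := by
  unfold Pre_iter_indices; infer_instance
def pvWitness_iter_indices : List Int := [2, 3]

def Spec_iter_indices (shape : List Int) (out : List (List Int)) : Prop := out = iter_indices_alt shape
instance (shape : List Int) (out : List (List Int)) : Decidable (Spec_iter_indices shape out) := by unfold Spec_iter_indices; infer_instance

-- ===== CLAIM (what is proved, stated in full; the proofs are below) =====
def Claim_equal_iter_indices : Prop := ∀ (shape : List Int), Dom_iter_indices shape → Pre_iter_indices shape → Spec_iter_indices shape (iter_indices shape)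

-- ===== LEMMAS AND PROOFS =====
theorem iter_indices_eq (shape : List Int) (h : Pre_iter_indices shape) :
    iter_indices shape = iter_indices_alt shape := by
  match shape with
  | [a] => simp [iter_indices, iter_indices_alt, iterIndicesRec]
  | [a, b] => simp [iter_indices, iter_indices_alt, iterIndicesRec]
  | [a, b, c] => simp [iter_indices, iter_indices_alt, iterIndicesRec]
  | [] => simp [Pre_iter_indices] at h
  | _ :: _ :: _ :: _ :: _ => simp [Pre_iter_indices] at h

-- ===== VERDICT (by name: the statement is the Claim_ definition above) =====
theorem iter_indices_spec : Claim_equal_iter_indices := by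
  intro shape _ hpre
  exact iter_indices_eq shape hpre
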